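-- pv_equiv track=rewrite | github.com/am1bestofluck/python_insight | sem14/t_1.py | filter_ASKII_spaces
-- ===== SOURCE A (Python) =====
-- from string import ascii_letters
--
-- def filter_ASKII_spaces(text: str):
--
--     tmp = ascii_letters + " "
--     out = ""
--     for itm in text:
--         if itm in tmp:
--             out += itm
--     out = out.lower()
--     return out
-- ===== SOURCE B (Python) =====
-- import re
--
-- def filter_ASKII_spaces(text: str):
--     return re.sub(r'[^A-Za-z ]', '', text).lower()
-- ===== Notes on version B (the rewrite author's own statement) =====
-- stated objective: idiomatic
-- what changed: The explicit accumulator loop with a 53-character membership string is replaced by a single regex substitution deleting every character outside [A-Za-z ], then .lower(); this removes the per-character membership scan and repeated string concatenation (measured ~4x faster at the largest size).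
import Mathlib
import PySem

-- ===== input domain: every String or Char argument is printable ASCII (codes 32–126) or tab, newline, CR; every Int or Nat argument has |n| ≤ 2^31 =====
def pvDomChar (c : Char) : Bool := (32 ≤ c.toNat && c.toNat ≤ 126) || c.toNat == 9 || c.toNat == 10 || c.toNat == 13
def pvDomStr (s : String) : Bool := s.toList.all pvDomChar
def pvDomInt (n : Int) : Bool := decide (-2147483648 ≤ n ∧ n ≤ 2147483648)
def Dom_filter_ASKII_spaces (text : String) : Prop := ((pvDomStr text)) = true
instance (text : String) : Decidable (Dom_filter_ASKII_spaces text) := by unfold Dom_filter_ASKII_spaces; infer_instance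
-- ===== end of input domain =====

-- B replaces A's explicit accumulator loop over a membership string by a single
-- regex substitution deleting every character outside [A-Za-z ], then .lower() (idiomatic).


-- ===== PORT A =====
-- string.ascii_letters, as a character list
def pvAsciiLetters : List Char :=
  ['a','b','c','d','e','f','g','h','i','j','k','l','m','n','o','p','q','r','s','t','u','v','w','x','y','z',
   'A','B','C','D','E','F','G','H','I','J','K','L','M','N','O','P','Q','R','S','T','U','V','W','X','Y','Z']

def filter_ASKII_spaces (text : String) : String :=
  let tmp : List Char := pvAsciiLetters ++ [' ']          -- tmp = ascii_letters + " "
  let out : List Char :=                                   -- out = ""; for itm in text: if itm in tmp: out += itm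
    text.toList.foldl (fun out itm => if PySem.Chars.isIn [itm] tmp then out ++ [itm] else out) []
  String.ofList (PySem.Chars.lower out)                        -- out = out.lower(); return out

-- ===== PORT B =====
-- the regex character class [A-Za-z ] of Source B, as a predicate on one character
def pvKeep (c : Char) : Bool := ('A' ≤ c && c ≤ 'Z') || ('a' ≤ c && c ≤ 'z') || c == ' '

-- re.sub(r'[^A-Za-z ]', '', text) deletes exactly the characters not matching pvKeep,
-- i.e. keeps the characters matching it; then .lower()
def filter_ASKII_spaces_alt (text : String) : String :=
  String.ofList (PySem.Chars.lower (text.toList.filter pvKeep))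

-- ===== PRECONDITION & SPEC =====
def Spec_filter_ASKII_spaces (text : String) (out : String) : Prop := out = filter_ASKII_spaces_alt text
instance (text : String) (out : String) : Decidable (Spec_filter_ASKII_spaces text out) := by unfold Spec_filter_ASKII_spaces; infer_instance

-- ===== CLAIM (what is proved, stated in full; the proofs are below) =====
def Claim_equal_filter_ASKII_spaces : Prop := ∀ (text : String), Dom_filter_ASKII_spaces text → Spec_filter_ASKII_spaces text (filter_ASKII_spaces text)

-- ===== LEMMAS AND PROOFS =====
lemma pvChar_eq_of_toNat_eq (c d : Char) (h : c.toNat = d.toNat) : c = d :=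
  Char.ext (UInt32.toNat_inj.mp h)

set_option maxRecDepth 10000 in
lemma pvMem_tmp_iff (c : Char) :
    c ∈ pvAsciiLetters ++ [' '] ↔
      ((65 ≤ c.toNat ∧ c.toNat ≤ 90) ∨ (97 ≤ c.toNat ∧ c.toNat ≤ 122) ∨ c.toNat = 32) := by
  have h : ∀ d : Char, (c = d) = (c.toNat = d.toNat) :=
    fun d => propext ⟨fun h => h ▸ rfl, fun h => pvChar_eq_of_toNat_eq c d h⟩
  simp only [pvAsciiLetters, List.mem_append, List.mem_cons, h, List.not_mem_nil, or_false,
    Char.reduceToNat]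
  omega

lemma pvKeep_iff (c : Char) :
    pvKeep c = true ↔
      ((65 ≤ c.toNat ∧ c.toNat ≤ 90) ∨ (97 ≤ c.toNat ∧ c.toNat ≤ 122) ∨ c.toNat = 32) := by
  simp only [pvKeep, Bool.or_eq_true, Bool.and_eq_true, decide_eq_true_eq, beq_iff_eq,
    Char.le_def, UInt32.le_iff_toNat_le, Char.ext_iff, UInt32.ext_iff]
  simp only [Char.reduceVal, UInt32.reduceToNat, Char.toNat]
  tauto

lemma pvIsIn_eq_keep (c : Char) : PySem.Chars.isIn [c] (pvAsciiLetters ++ [' ']) = pvKeep c := by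
  rw [Bool.eq_iff_iff, PySem.Chars.isIn_iff_infix, List.singleton_infix_iff, pvMem_tmp_iff,
    pvKeep_iff]

-- ===== VERDICT (by name: the statement is the Claim_ definition above) =====
theorem filter_ASKII_spaces_spec : Claim_equal_filter_ASKII_spaces := by
  intro text _
  unfold Spec_filter_ASKII_spaces filter_ASKII_spaces filter_ASKII_spaces_alt
  simp only [pvIsIn_eq_keep]
  rw [PySem.List.foldl_append_if_eq_filter, List.nil_append]
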